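-- pv_equiv track=rewrite | github.com/drdeford/sfc_analysis | Single_Core/cpics.py | nndsmart
-- ===== SOURCE A (Python) =====
-- def nndsmart(point_list,dist):
--     l=len(point_list)
--     #qdist=(2*dist+1)**@
--     #tree=sp.spatial.KDTree(point_list)
--     #for i in range(l):
--     #    for k in tree.query([point_list[i][0],point_list[i][1]],qdist,0,1,dist)[1]:
--     #        point_list[i].append(point_list[k][2])
--     for j in range(l):
--         for k in range(j+1,l):
--            # if point_list[k][0] in range(point_list[j][0]-dist,point_list[j][0]+dist+1):
--             if abs(point_list[j][0]-point_list[k][0])<=dist and abs(point_list[j][1]-point_list[k][1])<=dist: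
--                 point_list[j].append(point_list[k][2])
--                 point_list[k].append(point_list[j][2])
--     #for m in range(l):
--     #    point_list[m]=point_list[m][2:]
--     return point_list
-- ===== SOURCE B (Python) =====
-- def nndsmart(point_list, dist):
--     # Spatial grid hashing: bucket points by dist-sized cell, examine only the
--     # 3x3 adjacent cells, sort neighbor indices (A's interleaved appends produce
--     # labels in ascending index order). Pure: builds a new list (A mutates in place).
--     d = dist if dist > 0 else 1
--     grid = {}
--     for i, p in enumerate(point_list):
--         grid.setdefault((p[0] // d, p[1] // d), []).append(i)
--     out = []
--     for i, row in enumerate(point_list):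
--         cx, cy = row[0] // d, row[1] // d
--         nbrs = sorted(m
--                       for gx in (cx - 1, cx, cx + 1)
--                       for gy in (cy - 1, cy, cy + 1)
--                       for m in grid.get((gx, gy), [])
--                       if m != i
--                       and abs(row[0] - point_list[m][0]) <= dist
--                       and abs(row[1] - point_list[m][1]) <= dist)
--         out.append(row + [point_list[m][2] for m in nbrs])
--     return out
-- ===== Notes on version B (the rewrite author's own statement) =====
-- stated objective: alternative
-- what changed: Replaces A's in-place all-pairs double loop by spatial grid hashing: points are bucketed into dist-sized cells once, each point scans only the 9 adjacent cells and sorts the neighbor indices (A's interleaved pair-order appends yield labels in ascending index order), building a new list instead of mutating.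
-- outside the precondition, e.g. on nndsmart([[0]], 1): A returns [[0]], B raises IndexError; on nndsmart([[0, 0], [0, 0, 7]], 0): A returns [[0, 0, 7], [0, 0, 7, 7]], B raises IndexError
import Mathlib
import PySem

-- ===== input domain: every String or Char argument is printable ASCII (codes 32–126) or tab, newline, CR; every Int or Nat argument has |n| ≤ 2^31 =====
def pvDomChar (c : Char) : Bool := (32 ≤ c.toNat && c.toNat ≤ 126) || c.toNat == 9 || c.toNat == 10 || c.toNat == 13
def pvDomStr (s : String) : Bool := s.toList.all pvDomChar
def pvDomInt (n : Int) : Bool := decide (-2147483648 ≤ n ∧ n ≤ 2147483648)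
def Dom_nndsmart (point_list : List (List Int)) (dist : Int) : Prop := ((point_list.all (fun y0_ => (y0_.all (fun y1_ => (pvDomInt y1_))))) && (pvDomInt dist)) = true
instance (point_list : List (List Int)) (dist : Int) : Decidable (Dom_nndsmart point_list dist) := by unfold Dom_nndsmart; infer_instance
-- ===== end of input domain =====

-- B replaces A's all-pairs double loop with grid hashing over dist-sized cells (scan the 9
-- adjacent cells per point, sort neighbor indices). A mutates point_list in place and
-- returns it, B builds a new list: the equivalence is about the return value only.

-- ===== PORT A =====
-- Python range(l) / range(j+1,l) have Nat bounds, ported exactly as List.range / List.range'.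
-- point_list[j][c] is ported as getD with default: exact under Pre_nndsmart, which excludes
-- every input on which some indexing would raise IndexError or hit a previously appended value.
def nndsmart (point_list : List (List Int)) (dist : Int) : List (List Int) :=
  let l := point_list.length
  (List.range l).foldl (fun st j =>
    (List.range' (j+1) (l - (j+1))).foldl (fun st k =>
      if |(st.getD j []).getD 0 0 - (st.getD k []).getD 0 0| ≤ dist ∧
         |(st.getD j []).getD 1 0 - (st.getD k []).getD 1 0| ≤ dist then
        let st1 := st.set j ((st.getD j []) ++ [(st.getD k []).getD 2 0])
        st1.set k ((st1.getD k []) ++ [(st1.getD j []).getD 2 0])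
      else st) st) point_list

-- ===== PORT B =====
-- Python enumerate(point_list) is ported as List.zipIdx ((row, index) pairs);
-- grid.setdefault(c, []).append(i) is Dict.modify c [] (· ++ [i]); sorted(...) is PySem.List.sorted.
def nndsmart_alt (point_list : List (List Int)) (dist : Int) : List (List Int) :=
  let d := if dist > 0 then dist else 1
  let grid : PySem.Dict (Int × Int) (List Nat) :=
    point_list.zipIdx.foldl
      (fun g ip => g.modify (PySem.Int.floordiv (ip.1.getD 0 0) d, PySem.Int.floordiv (ip.1.getD 1 0) d)
                     [] (· ++ [ip.2])) PySem.Dict.empty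
  point_list.zipIdx.map (fun ip =>
    let cx := PySem.Int.floordiv (ip.1.getD 0 0) d
    let cy := PySem.Int.floordiv (ip.1.getD 1 0) d
    let nbrs := PySem.List.sorted
      (([cx - 1, cx, cx + 1]).flatMap (fun gx =>
        ([cy - 1, cy, cy + 1]).flatMap (fun gy =>
          (grid.getD (gx, gy) []).filter (fun m =>
            decide (m ≠ ip.2) &&
            decide (|ip.1.getD 0 0 - ((point_list.getD m []).getD 0 0)| ≤ dist) &&
            decide (|ip.1.getD 1 0 - ((point_list.getD m []).getD 1 0)| ≤ dist)))))
      (fun x => x) false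
    ip.1 ++ nbrs.map (fun m => (point_list.getD m []).getD 2 0))

-- ===== PRECONDITION & SPEC =====
-- Neighborhood test on the ORIGINAL rows (used by Pre_nndsmart and by the proofs).
def pvClose (point_list : List (List Int)) (dist : Int) (i m : Nat) : Bool :=
  decide (m ≠ i) &&
  decide (|(point_list.getD i []).getD 0 0 - (point_list.getD m []).getD 0 0| ≤ dist) &&
  decide (|(point_list.getD i []).getD 1 0 - (point_list.getD m []).getD 1 0| ≤ dist)

-- Pre_ excludes inputs with rows too short for the coordinate/label reads: on those A either
-- raises IndexError, or — when an append lengthens a short row before its index-2 read — it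
-- accidentally returns a previously appended label as a point label; B raises IndexError there.
def Pre_nndsmart (point_list : List (List Int)) (dist : Int) : Prop :=
  point_list = [] ∨
  ((∀ r ∈ point_list, 2 ≤ r.length) ∧
   ∀ i ∈ List.range point_list.length, ∀ m ∈ List.range point_list.length,
     pvClose point_list dist i m = true → 3 ≤ (point_list.getD i []).length)
instance (point_list : List (List Int)) (dist : Int) : Decidable (Pre_nndsmart point_list dist) := by
  unfold Pre_nndsmart; infer_instance

def pvWitness_nndsmart : List (List Int) × Int := ([[0, 0, 1], [1, 1, 2]], 1)

def Spec_nndsmart (point_list : List (List Int)) (dist : Int) (out : List (List Int)) : Prop := out = nndsmart_alt point_list dist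
instance (point_list : List (List Int)) (dist : Int) (out : List (List Int)) : Decidable (Spec_nndsmart point_list dist out) := by unfold Spec_nndsmart; infer_instance

-- ===== CLAIM (what is proved, stated in full; the proofs are below) =====
def Claim_equal_nndsmart : Prop := ∀ (point_list : List (List Int)) (dist : Int), Dom_nndsmart point_list dist → Pre_nndsmart point_list dist → Spec_nndsmart point_list dist (nndsmart point_list dist)

-- ===== LEMMAS AND PROOFS =====

def pvNbhd (pl : List (List Int)) (dist : Int) (i : Nat) : List Nat :=
  (List.range pl.length).filter (pvClose pl dist i)

-- The common target: each row extended by its neighbors' labels in ascending index order.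
def pvSpec (pl : List (List Int)) (dist : Int) : List (List Int) :=
  (List.range pl.length).map (fun i =>
    pl.getD i [] ++ (pvNbhd pl dist i).map (fun m => (pl.getD m []).getD 2 0))

def pvD (dist : Int) : Int := if dist > 0 then dist else 1
def pvCell (pl : List (List Int)) (dist : Int) (m : Nat) : Int × Int :=
  (PySem.Int.floordiv ((pl.getD m []).getD 0 0) (pvD dist),
   PySem.Int.floordiv ((pl.getD m []).getD 1 0) (pvD dist))

lemma pvClose_symm (pl : List (List Int)) (dist : Int) (i m : Nat) :
    pvClose pl dist i m = pvClose pl dist m i := by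
  unfold pvClose
  rw [abs_sub_comm ((pl.getD i []).getD 0 0), abs_sub_comm ((pl.getD i []).getD 1 0),
    show (decide (m ≠ i)) = (decide (i ≠ m)) from by simp [decide_eq_decide]; exact eq_comm]

lemma pvClose_ne (pl : List (List Int)) (dist : Int) {i m : Nat}
    (h : pvClose pl dist i m = true) : m ≠ i := by
  unfold pvClose at h
  simp only [Bool.and_eq_true, decide_eq_true_eq] at h
  exact h.1.1

-- ---- B side ----

lemma pv_zipIdx (pl : List (List Int)) :
    pl.zipIdx = (List.range pl.length).map (fun i => (pl.getD i [], i)) := by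
  apply List.ext_getElem (by simp [List.length_zipIdx])
  intro i h1 h2
  have hi : i < pl.length := by simpa [List.length_zipIdx] using h1
  simp only [List.getElem_zipIdx, List.getElem_map, List.getElem_range,
    List.getD_eq_getElem pl [] hi, Nat.zero_add]

lemma pv_grid_getD (pl : List (List Int)) (dist : Int) (c : Int × Int) :
    (pl.zipIdx.foldl
      (fun g ip => g.modify (PySem.Int.floordiv (ip.1.getD 0 0) (pvD dist), PySem.Int.floordiv (ip.1.getD 1 0) (pvD dist))
                     [] (· ++ [ip.2])) PySem.Dict.empty).getD c []
    = (List.range pl.length).filter (fun m => pvCell pl dist m == c) := by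
  rw [pv_zipIdx, List.foldl_map]
  have h := PySem.Dict.getD_foldl_modify_append
    ((List.range pl.length).map (fun i => (pvCell pl dist i, i)))
    (PySem.Dict.empty : PySem.Dict (Int × Int) (List Nat)) c
  rw [List.foldl_map] at h
  simp only [pvCell, pvD] at h ⊢
  rw [h, List.filter_map, List.map_map]
  simp [Function.comp_def]

lemma pv_filter_mem_perm {α κ : Type} [BEq κ] [LawfulBEq κ] [DecidableEq κ] (l : List α) (key : α → κ) (p : α → Bool) :
    ∀ ks : List κ, ks.Nodup →
      (ks.flatMap (fun c => l.filter (fun m => (key m == c) && p m))).Perm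
        (l.filter (fun m => p m && decide (key m ∈ ks))) := by
  intro ks hnd
  induction ks with
  | nil => simp
  | cons c ks ih =>
    have hcn : c ∉ ks := (List.nodup_cons.mp hnd).1
    have ihp := ih (List.Nodup.of_cons hnd)
    rw [List.flatMap_cons]
    refine ((ihp.append_left _).trans ?_)
    clear ihp ih hnd
    induction l with
    | nil => simp
    | cons a l ihl =>
      by_cases hpa : p a = true
      · by_cases hk : key a = c
        · have e1 : ((key a == c) && p a) = true := by simp [hk, hpa]
          have e2 : (p a && decide (key a ∈ ks)) = false := by simp [hk, hcn]
          have e3 : (p a && decide (key a ∈ c :: ks)) = true := by simp [hpa, hk]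
          simp only [List.filter_cons, e1, e2, e3, if_true, Bool.false_eq_true, if_false,
            List.cons_append]
          exact ihl.cons a
        · have e1 : ((key a == c) && p a) = false := by simp [hk]
          by_cases hmem : key a ∈ ks
          · have e2 : (p a && decide (key a ∈ ks)) = true := by simp [hpa, hmem]
            have e3 : (p a && decide (key a ∈ c :: ks)) = true := by simp [hpa, hmem]
            simp only [List.filter_cons, e1, e2, e3, if_true, Bool.false_eq_true, if_false]
            exact List.perm_middle.trans (ihl.cons a)
          · have e2 : (p a && decide (key a ∈ ks)) = false := by simp [hmem]
            have e3 : (p a && decide (key a ∈ c :: ks)) = false := by simp [hk, hmem]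
            simp only [List.filter_cons, e1, e2, e3, Bool.false_eq_true, if_false]
            exact ihl
      · have hpa' : p a = false := by simpa using hpa
        have e1 : ((key a == c) && p a) = false := by simp [hpa']
        have e2 : (p a && decide (key a ∈ ks)) = false := by simp [hpa']
        have e3 : (p a && decide (key a ∈ c :: ks)) = false := by simp [hpa']
        simp only [List.filter_cons, e1, e2, e3, Bool.false_eq_true, if_false]
        exact ihl

lemma pv_nine_nodup (cx cy : Int) :
    ([(cx-1,cy-1),(cx-1,cy),(cx-1,cy+1),(cx,cy-1),(cx,cy),(cx,cy+1),(cx+1,cy-1),(cx+1,cy),(cx+1,cy+1)] : List (Int × Int)).Nodup := by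
  simp only [List.nodup_cons, List.mem_cons, List.not_mem_nil, Prod.mk.injEq, not_or,
    not_and, or_false, List.nodup_nil, and_true, true_implies, not_false_eq_true]
  omega

lemma pv_cell_mem (pl : List (List Int)) (dist : Int) {i m : Nat}
    (h : pvClose pl dist i m = true) :
    pvCell pl dist m ∈ ([((pvCell pl dist i).1-1,(pvCell pl dist i).2-1),((pvCell pl dist i).1-1,(pvCell pl dist i).2),((pvCell pl dist i).1-1,(pvCell pl dist i).2+1),((pvCell pl dist i).1,(pvCell pl dist i).2-1),((pvCell pl dist i).1,(pvCell pl dist i).2),((pvCell pl dist i).1,(pvCell pl dist i).2+1),((pvCell pl dist i).1+1,(pvCell pl dist i).2-1),((pvCell pl dist i).1+1,(pvCell pl dist i).2),((pvCell pl dist i).1+1,(pvCell pl dist i).2+1)] : List (Int × Int)) := by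
  unfold pvClose at h
  simp only [Bool.and_eq_true, decide_eq_true_eq] at h
  obtain ⟨⟨-, hx⟩, hy⟩ := h
  have hax := abs_le.mp hx
  have hay := abs_le.mp hy
  have hdpos : (0:Int) < pvD dist := by unfold pvD; split <;> omega
  have hdd : dist ≤ pvD dist := by unfold pvD; split <;> omega
  unfold pvCell
  rw [PySem.Int.floordiv_eq_ediv_of_pos hdpos, PySem.Int.floordiv_eq_ediv_of_pos hdpos,
      PySem.Int.floordiv_eq_ediv_of_pos hdpos, PySem.Int.floordiv_eq_ediv_of_pos hdpos]
  set d := pvD dist with hd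
  set xi := ((pl.getD i []).getD 0 0) with hxi
  set yi := ((pl.getD i []).getD 1 0) with hyi
  set xm := ((pl.getD m []).getD 0 0) with hxm
  set ym := ((pl.getD m []).getD 1 0) with hym
  have l1 : (xi - d) / d ≤ xm / d := Int.ediv_le_ediv hdpos (by omega)
  have l2 : xm / d ≤ (xi + d) / d := Int.ediv_le_ediv hdpos (by omega)
  have l3 : (yi - d) / d ≤ ym / d := Int.ediv_le_ediv hdpos (by omega)
  have l4 : ym / d ≤ (yi + d) / d := Int.ediv_le_ediv hdpos (by omega)
  have e1 : (xi - d) / d = xi / d - 1 := by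
    have hsub : xi - d = xi + (-1) * d := by ring
    rw [hsub, Int.add_mul_ediv_right _ _ (ne_of_gt hdpos)]
    ring
  have e2 : (xi + d) / d = xi / d + 1 := by
    have hadd : xi + d = xi + 1 * d := by ring
    rw [hadd, Int.add_mul_ediv_right _ _ (ne_of_gt hdpos)]
  have e3 : (yi - d) / d = yi / d - 1 := by
    have hsub : yi - d = yi + (-1) * d := by ring
    rw [hsub, Int.add_mul_ediv_right _ _ (ne_of_gt hdpos)]
    ring
  have e4 : (yi + d) / d = yi / d + 1 := by
    have hadd : yi + d = yi + 1 * d := by ring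
    rw [hadd, Int.add_mul_ediv_right _ _ (ne_of_gt hdpos)]
  simp only [List.mem_cons, Prod.mk.injEq, List.not_mem_nil, or_false]
  omega

lemma pv_sorted_cand (pl : List (List Int)) (dist : Int) (i : Nat) (cx cy : Int)
    (hcx : cx = (pvCell pl dist i).1) (hcy : cy = (pvCell pl dist i).2) :
    PySem.List.sorted
      (([cx - 1, cx, cx + 1]).flatMap (fun gx =>
        ([cy - 1, cy, cy + 1]).flatMap (fun gy =>
          ((List.range pl.length).filter (fun m => pvCell pl dist m == (gx, gy))).filter
            (fun m => pvClose pl dist i m))))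
      (fun x => x) false = pvNbhd pl dist i := by
  apply PySem.List.sorted_eq_of_perm_of_pairwise_lt
  · subst hcx; subst hcy
    have hflat : (([(pvCell pl dist i).1 - 1, (pvCell pl dist i).1, (pvCell pl dist i).1 + 1]).flatMap (fun gx =>
        ([(pvCell pl dist i).2 - 1, (pvCell pl dist i).2, (pvCell pl dist i).2 + 1]).flatMap (fun gy =>
          ((List.range pl.length).filter (fun m => pvCell pl dist m == (gx, gy))).filter
            (fun m => pvClose pl dist i m))))
      = (([((pvCell pl dist i).1-1,(pvCell pl dist i).2-1),((pvCell pl dist i).1-1,(pvCell pl dist i).2),((pvCell pl dist i).1-1,(pvCell pl dist i).2+1),((pvCell pl dist i).1,(pvCell pl dist i).2-1),((pvCell pl dist i).1,(pvCell pl dist i).2),((pvCell pl dist i).1,(pvCell pl dist i).2+1),((pvCell pl dist i).1+1,(pvCell pl dist i).2-1),((pvCell pl dist i).1+1,(pvCell pl dist i).2),((pvCell pl dist i).1+1,(pvCell pl dist i).2+1)] : List (Int × Int)).flatMap (fun c =>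
          ((List.range pl.length).filter (fun m => pvCell pl dist m == c)).filter
            (fun m => pvClose pl dist i m))) := by
      simp [List.flatMap_cons, List.flatMap_nil, List.append_assoc]
    rw [hflat]
    have hff : ∀ c : Int × Int,
        ((List.range pl.length).filter (fun m => pvCell pl dist m == c)).filter
          (fun m => pvClose pl dist i m)
        = (List.range pl.length).filter (fun m => (pvCell pl dist m == c) && pvClose pl dist i m) := by
      intro c
      rw [List.filter_filter]
      exact List.filter_congr (fun m _ => Bool.and_comm _ _)
    simp only [hff]
    have hperm := pv_filter_mem_perm (List.range pl.length) (pvCell pl dist) (pvClose pl dist i)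
      _ (pv_nine_nodup (pvCell pl dist i).1 (pvCell pl dist i).2)
    refine List.Perm.symm (hperm.trans ?_)
    exact List.Perm.of_eq (List.filter_congr (fun m hm => by
      cases hc : pvClose pl dist i m with
      | false => simp [hc]
      | true => simp [hc, pv_cell_mem pl dist hc]))
  · exact List.Pairwise.filter _ List.pairwise_lt_range

lemma pv_alt_eq_spec (pl : List (List Int)) (dist : Int) :
    nndsmart_alt pl dist = pvSpec pl dist := by
  unfold nndsmart_alt
  simp only [show (if dist > 0 then dist else 1) = pvD dist from rfl]
  simp only [pv_grid_getD pl dist]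
  conv_lhs => rw [pv_zipIdx]
  rw [List.map_map]
  unfold pvSpec
  apply List.map_congr_left
  intro i hi
  have hs := pv_sorted_cand pl dist i (pvCell pl dist i).1 (pvCell pl dist i).2 rfl rfl
  exact congrArg (fun z => pl.getD i [] ++ List.map (fun m => (pl.getD m []).getD 2 0) z) hs

-- ---- A side ----

-- A's inner-loop body, named so the loop lemmas below can state equations about it
-- (definitionally equal to the lambda inside nndsmart).
def pvInner (pl : List (List Int)) (dist : Int) (j : Nat) : List (List Int) → Nat → List (List Int) :=
  fun st k =>
    if |(st.getD j []).getD 0 0 - (st.getD k []).getD 0 0| ≤ dist ∧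
       |(st.getD j []).getD 1 0 - (st.getD k []).getD 1 0| ≤ dist then
      (st.set j ((st.getD j []) ++ [(st.getD k []).getD 2 0])).set k
        (((st.set j ((st.getD j []) ++ [(st.getD k []).getD 2 0])).getD k []) ++
         [((st.set j ((st.getD j []) ++ [(st.getD k []).getD 2 0])).getD j []).getD 2 0])
    else st

def pvDone (J K i m : Nat) : Bool := decide (min i m < J ∨ (min i m = J ∧ max i m < K))

-- The state of A's list after all pairs (a,b), a<b, lexicographically before (J,K) have been
-- processed: row i carries the labels of its already-processed neighbors, in ascending order.
def pvStA (pl : List (List Int)) (dist : Int) (dn : Nat → Nat → Bool) : List (List Int) :=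
  (List.range pl.length).map (fun i =>
    pl.getD i [] ++ ((List.range pl.length).filter (fun m => pvClose pl dist i m && dn i m)).map
      (fun m => (pl.getD m []).getD 2 0))

lemma pv_length_stA (pl : List (List Int)) (dist : Int) (dn : Nat → Nat → Bool) :
    (pvStA pl dist dn).length = pl.length := by
  unfold pvStA; simp

lemma pv_getD_stA (pl : List (List Int)) (dist : Int) (dn : Nat → Nat → Bool) {t : Nat}
    (ht : t < pl.length) :
    (pvStA pl dist dn).getD t []
      = pl.getD t [] ++ ((List.range pl.length).filter (fun m => pvClose pl dist t m && dn t m)).map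
          (fun m => (pl.getD m []).getD 2 0) := by
  unfold pvStA
  rw [List.getD_eq_getElem _ [] (by simpa using ht)]
  simp

lemma pv_read (pl : List (List Int)) (dist : Int) (dn : Nat → Nat → Bool) {t c : Nat}
    (ht : t < pl.length) (hc : c < (pl.getD t []).length) :
    ((pvStA pl dist dn).getD t []).getD c 0 = (pl.getD t []).getD c 0 := by
  rw [pv_getD_stA pl dist dn ht, List.getD_append _ _ _ _ hc]

lemma pv_stA_congr (pl : List (List Int)) (dist : Int) (d1 d2 : Nat → Nat → Bool)
    (h : ∀ i m, i < pl.length → m < pl.length → pvClose pl dist i m = true → d1 i m = d2 i m) :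
    pvStA pl dist d1 = pvStA pl dist d2 := by
  unfold pvStA
  apply List.map_congr_left
  intro i hi
  rw [List.filter_congr]
  intro m hm
  cases hcl : pvClose pl dist i m with
  | false => simp
  | true => rw [h i m (List.mem_range.mp hi) (List.mem_range.mp hm) hcl]

lemma pv_filter_snoc (p p' : Nat → Bool) (n K : Nat) (hK : K < n)
    (hpp' : ∀ m, m < n → p' m = (p m || decide (m = K))) (hpK : p K = false)
    (hlt : ∀ m, p m = true → m < K) :
    (List.range n).filter p' = (List.range n).filter p ++ [K] := by
  induction n with
  | zero => omega
  | succ n ih =>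
    rw [List.range_succ, List.filter_append, List.filter_append]
    by_cases hKn : K = n
    · subst hKn
      have h1 : (List.range K).filter p' = (List.range K).filter p := by
        apply List.filter_congr
        intro m hm
        have hmK : m < K := List.mem_range.mp hm
        rw [hpp' m (by omega)]
        simp [show m ≠ K from by omega]
      have h2 : p' K = true := by rw [hpp' K (by omega)]; simp
      simp [h1, h2, List.filter_cons, hpK]
    · have hKlt : K < n := by omega
      have hpn : p n = false := by
        cases hpn : p n
        · rfl
        · exact absurd (hlt n hpn) (by omega)
      have hp'n : p' n = false := by
        rw [hpp' n (by omega)]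
        simp [hpn, show n ≠ K from by omega]
      simp only [List.filter_cons, hpn, hp'n, Bool.false_eq_true, if_neg, ite_false,
        List.filter_nil, List.append_nil]
      exact ih hKlt (fun m hm => hpp' m (by omega))

lemma pv_inner_step (pl : List (List Int)) (dist : Int)
    (H2 : ∀ r ∈ pl, 2 ≤ r.length)
    (H3 : ∀ i < pl.length, ∀ m < pl.length, pvClose pl dist i m = true → 3 ≤ (pl.getD i []).length)
    (j k : Nat) (hj : j < pl.length) (hk : k < pl.length) (hjk : j < k) :
    pvInner pl dist j (pvStA pl dist (pvDone j k)) k = pvStA pl dist (pvDone j (k+1)) := by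
  have hrow2 : ∀ t, t < pl.length → 2 ≤ (pl.getD t []).length := by
    intro t ht
    rw [List.getD_eq_getElem pl [] ht]
    exact H2 _ (List.getElem_mem ht)
  have h0j : (0:Nat) < (pl.getD j []).length := by have := hrow2 j hj; omega
  have h1j : (1:Nat) < (pl.getD j []).length := by have := hrow2 j hj; omega
  have h0k : (0:Nat) < (pl.getD k []).length := by have := hrow2 k hk; omega
  have h1k : (1:Nat) < (pl.getD k []).length := by have := hrow2 k hk; omega
  unfold pvInner
  rw [pv_read pl dist _ hj h0j, pv_read pl dist _ hk h0k,
      pv_read pl dist _ hj h1j, pv_read pl dist _ hk h1k]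
  by_cases hcl : pvClose pl dist j k = true
  · have hj3 : 3 ≤ (pl.getD j []).length := H3 j hj k hk hcl
    have hk3 : 3 ≤ (pl.getD k []).length := H3 k hk j hj (by rwa [pvClose_symm] at hcl)
    have hcl' := hcl
    unfold pvClose at hcl'
    simp only [Bool.and_eq_true, decide_eq_true_eq] at hcl'
    rw [if_pos ⟨hcl'.1.2, hcl'.2⟩]
    rw [pv_read pl dist _ hk (show (2:Nat) < (pl.getD k []).length by omega)]
    set st := pvStA pl dist (pvDone j k) with hst
    set A := st.getD j [] ++ [(pl.getD k []).getD 2 0] with hA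
    have hlen : st.length = pl.length := pv_length_stA pl dist _
    have hjlt : j < (st.set j A).length := by rw [List.length_set, hlen]; exact hj
    have hklt : k < (st.set j A).length := by rw [List.length_set, hlen]; exact hk
    have e1 : (st.set j A).getD k [] = st.getD k [] := by
      rw [List.getD_eq_getElem _ [] hklt, List.getElem_set_ne (show j ≠ k by omega),
        ← List.getD_eq_getElem st [] (by rw [hlen]; exact hk)]
    have e2 : (st.set j A).getD j [] = A := by
      rw [List.getD_eq_getElem _ [] hjlt]
      simp [List.getElem_set]
    have e3 : A.getD 2 0 = (pl.getD j []).getD 2 0 := by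
      rw [hA, List.getD_append _ _ _ _ (by
        rw [pv_getD_stA pl dist _ hj, List.length_append]
        omega)]
      exact pv_read pl dist _ hj (by omega)
    rw [e1, e2, e3]
    -- the two snoc equations
    have hfj : (List.range pl.length).filter (fun m => pvClose pl dist j m && pvDone j (k+1) j m)
        = (List.range pl.length).filter (fun m => pvClose pl dist j m && pvDone j k j m) ++ [k] := by
      apply pv_filter_snoc _ _ _ _ hk
      · intro m hm
        by_cases hc : pvClose pl dist j m = true
        · have hmj : m ≠ j := pvClose_ne pl dist hc
          by_cases hmk : m = k
          · subst hmk
            simp only [hc, Bool.true_and, pvDone, decide_true, Bool.or_true,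
              decide_eq_true_eq]
            omega
          · simp only [hc, Bool.true_and, pvDone, hmk, decide_false, Bool.or_false,
              decide_eq_decide]
            omega
        · have hc' : pvClose pl dist j m = false := by simpa using hc
          have hmk : m ≠ k := by
            intro h; subst h; rw [hcl] at hc'; cases hc'
          simp [hc', hmk]
      · simp only [pvDone, Bool.and_eq_false_iff]
        right
        simp only [decide_eq_false_iff_not]
        omega
      · intro m hpm
        simp only [Bool.and_eq_true, pvDone, decide_eq_true_eq] at hpm
        have hmj : m ≠ j := pvClose_ne pl dist hpm.1
        omega
    have hfk : (List.range pl.length).filter (fun m => pvClose pl dist k m && pvDone j (k+1) k m)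
        = (List.range pl.length).filter (fun m => pvClose pl dist k m && pvDone j k k m) ++ [j] := by
      apply pv_filter_snoc _ _ _ _ hj
      · intro m hm
        by_cases hc : pvClose pl dist k m = true
        · have hmk : m ≠ k := pvClose_ne pl dist hc
          by_cases hmj : m = j
          · subst hmj
            simp only [hc, Bool.true_and, pvDone, decide_true, Bool.or_true,
              decide_eq_true_eq]
            omega
          · simp only [hc, Bool.true_and, pvDone, hmj, decide_false, Bool.or_false,
              decide_eq_decide]
            omega
        · have hc' : pvClose pl dist k m = false := by simpa using hc
          have hmj : m ≠ j := by
            intro h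
            rw [h, pvClose_symm pl dist k j, hcl] at hc'
            cases hc'
          simp [hc', hmj]
      · simp only [pvDone, Bool.and_eq_false_iff]
        right
        simp only [decide_eq_false_iff_not]
        omega
      · intro m hpm
        simp only [Bool.and_eq_true, pvDone, decide_eq_true_eq] at hpm
        have hmk : m ≠ k := pvClose_ne pl dist hpm.1
        omega
    apply List.ext_getElem
    · rw [List.length_set, List.length_set, hlen, pv_length_stA]
    intro i hi1 hi2
    have hi : i < pl.length := by
      rw [List.length_set, List.length_set, hlen] at hi1; exact hi1
    have hstA_getElem : ∀ (dn : Nat → Nat → Bool) (h : i < (pvStA pl dist dn).length),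
        (pvStA pl dist dn)[i]
          = pl.getD i [] ++ ((List.range pl.length).filter (fun m => pvClose pl dist i m && dn i m)).map
              (fun m => (pl.getD m []).getD 2 0) := by
      intro dn h
      unfold pvStA
      simp
    rw [List.getElem_set, List.getElem_set, hstA_getElem _ hi2]
    by_cases hik : k = i
    · subst hik
      rw [if_pos rfl]
      rw [hst, pv_getD_stA pl dist _ hk, hfk, List.map_append, List.append_assoc]
      rfl
    · rw [if_neg hik]
      by_cases hij : j = i
      · subst hij
        rw [if_pos rfl, hA, hst, pv_getD_stA pl dist _ hj, hfj, List.map_append,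
          List.append_assoc]
        rfl
      · rw [if_neg hij]
        simp only [hst]
        have : (pvStA pl dist (pvDone j k))[i]
            = pl.getD i [] ++ ((List.range pl.length).filter (fun m => pvClose pl dist i m && pvDone j k i m)).map
                (fun m => (pl.getD m []).getD 2 0) := by
          unfold pvStA; simp
        rw [this]
        congr 1
        congr 1
        apply List.filter_congr
        intro m hm
        cases hc : pvClose pl dist i m with
        | false => simp
        | true =>
          have hmi : m ≠ i := pvClose_ne pl dist hc
          simp only [Bool.true_and, pvDone, decide_eq_decide]
          omega
  · have hc' : pvClose pl dist j k = false := by simpa using hcl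
    rw [if_neg]
    · apply pv_stA_congr
      intro i m hi hm hc
      have hmi : m ≠ i := pvClose_ne pl dist hc
      unfold pvDone
      rw [decide_eq_decide]
      have hnjk : ¬ (i = j ∧ m = k) := by
        rintro ⟨h1, h2⟩; rw [← h1, ← h2, hc] at hc'; cases hc'
      have hnkj : ¬ (i = k ∧ m = j) := by
        rintro ⟨h1, h2⟩
        rw [← h2, ← h1, pvClose_symm pl dist m i, hc] at hc'
        cases hc'
      omega
    · intro hcond
      have : pvClose pl dist j k = true := by
        unfold pvClose
        simp only [Bool.and_eq_true, decide_eq_true_eq]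
        exact ⟨⟨by omega, hcond.1⟩, hcond.2⟩
      rw [this] at hc'; cases hc'

lemma pv_inner_fold (pl : List (List Int)) (dist : Int)
    (H2 : ∀ r ∈ pl, 2 ≤ r.length)
    (H3 : ∀ i < pl.length, ∀ m < pl.length, pvClose pl dist i m = true → 3 ≤ (pl.getD i []).length)
    (j : Nat) (hj : j < pl.length) :
    ∀ (len K : Nat), j < K → K + len = pl.length →
      (List.range' K len).foldl (pvInner pl dist j) (pvStA pl dist (pvDone j K))
        = pvStA pl dist (pvDone j pl.length) := by
  intro len
  induction len with
  | zero =>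
    intro K hK hKl
    simp only [List.range'_zero, List.foldl_nil]
    have : K = pl.length := by omega
    rw [this]
  | succ len ih =>
    intro K hK hKl
    rw [List.range'_succ, List.foldl_cons,
      pv_inner_step pl dist H2 H3 j K hj (by omega) hK]
    exact ih (K+1) (by omega) (by omega)

lemma pv_stA_shift (pl : List (List Int)) (dist : Int) (j : Nat) :
    pvStA pl dist (pvDone j pl.length) = pvStA pl dist (pvDone (j+1) (j+2)) := by
  apply pv_stA_congr
  intro i m hi hm hc
  have hmi : m ≠ i := pvClose_ne pl dist hc
  unfold pvDone
  rw [decide_eq_decide]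
  omega

lemma pv_outer_fold (pl : List (List Int)) (dist : Int)
    (H2 : ∀ r ∈ pl, 2 ≤ r.length)
    (H3 : ∀ i < pl.length, ∀ m < pl.length, pvClose pl dist i m = true → 3 ≤ (pl.getD i []).length) :
    ∀ (len J : Nat), J + len = pl.length →
      (List.range' J len).foldl
        (fun st j => (List.range' (j+1) (pl.length - (j+1))).foldl (pvInner pl dist j) st)
        (pvStA pl dist (pvDone J (J+1)))
        = pvStA pl dist (pvDone pl.length (pl.length+1)) := by
  intro len
  induction len with
  | zero =>
    intro J hJ
    simp only [List.range'_zero, List.foldl_nil]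
    have : J = pl.length := by omega
    rw [this]
  | succ len ih =>
    intro J hJ
    rw [List.range'_succ, List.foldl_cons]
    have hbody : (List.range' (J+1) (pl.length - (J+1))).foldl (pvInner pl dist J)
        (pvStA pl dist (pvDone J (J+1))) = pvStA pl dist (pvDone J pl.length) :=
      pv_inner_fold pl dist H2 H3 J (by omega) (pl.length - (J+1)) (J+1) (by omega) (by omega)
    rw [hbody, pv_stA_shift]
    exact ih (J+1) (by omega)

lemma pv_stA_init (pl : List (List Int)) (dist : Int) :
    pvStA pl dist (pvDone 0 1) = pl := by
  unfold pvStA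
  apply List.ext_getElem (by simp)
  intro i h1 h2
  simp only [List.getElem_map, List.getElem_range]
  have hi : i < pl.length := by simpa using h2
  have hfe : (List.range pl.length).filter (fun m => pvClose pl dist i m && pvDone 0 1 i m) = [] := by
    apply List.filter_eq_nil_iff.mpr
    intro m hm
    cases hc : pvClose pl dist i m with
    | false => simp
    | true =>
      have hmi : m ≠ i := pvClose_ne pl dist hc
      simp only [Bool.true_and, pvDone, decide_eq_true_eq, Bool.not_eq_true,
        decide_eq_false_iff_not]
      omega
  rw [hfe]
  simp only [List.map_nil, List.append_nil]
  exact List.getD_eq_getElem pl [] hi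

lemma pv_stA_final (pl : List (List Int)) (dist : Int) :
    pvStA pl dist (pvDone pl.length (pl.length+1)) = pvSpec pl dist := by
  unfold pvStA pvSpec pvNbhd
  apply List.map_congr_left
  intro i hi
  have hi' : i < pl.length := List.mem_range.mp hi
  congr 1
  refine congrArg _ ?_
  apply List.filter_congr
  intro m hm
  have hm' : m < pl.length := List.mem_range.mp hm
  by_cases hc : pvClose pl dist i m = true
  · rw [hc]
    simp only [Bool.true_and, pvDone, decide_eq_true_eq]
    omega
  · have hc' : pvClose pl dist i m = false := by simpa using hc
    rw [hc']
    simp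

lemma pv_a_eq_spec (pl : List (List Int)) (dist : Int)
    (H2 : ∀ r ∈ pl, 2 ≤ r.length)
    (H3 : ∀ i < pl.length, ∀ m < pl.length, pvClose pl dist i m = true → 3 ≤ (pl.getD i []).length) :
    nndsmart pl dist = pvSpec pl dist := by
  have h0 := pv_outer_fold pl dist H2 H3 pl.length 0 (by omega)
  rw [pv_stA_init pl dist] at h0
  rw [show nndsmart pl dist = (List.range pl.length).foldl
    (fun st j => (List.range' (j+1) (pl.length - (j+1))).foldl (pvInner pl dist j) st) pl from rfl]
  rw [List.range_eq_range', h0, pv_stA_final]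

-- ===== VERDICT (by name: the statement is the Claim_ definition above) =====
theorem nndsmart_spec : Claim_equal_nndsmart := by
  intro pl dist _ hpre
  unfold Spec_nndsmart
  rcases hpre with h | ⟨H2, H3⟩
  · subst h; rfl
  · rw [pv_alt_eq_spec, pv_a_eq_spec pl dist H2]
    intro i hi m hm hc
    exact H3 i (List.mem_range.mpr hi) m (List.mem_range.mpr hm) hc
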